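-- pv_equiv track=rewrite | github.com/wonjw3638/Solve-Python-Problems | 프로그래머스/lv1/42840. 모의고사/모의고사.py | solution
-- ===== SOURCE A (Python) =====
-- def solution(answers):
--     std1 = [1, 2, 3, 4, 5]
--     std2 = [2, 1, 2, 3, 2, 4, 2, 5]
--     std3 = [3, 3, 1, 1, 2, 2, 4, 4, 5, 5]
--
--     score1, score2, score3 = 0, 0, 0
--
--     for idx, ans in enumerate(answers):
--         if ans == std1[(idx%5)]: score1 += 1
--         if ans == std2[(idx%8)]: score2 += 1
--         if ans == std3[(idx%10)]: score3 += 1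
--
--     maxScore = max(score1, score2, score3)
--     arr = [-1, score1, score2, score3]
--     answer = []
--
--     for idx, score in enumerate(arr):
--         if score == maxScore:
--             answer.append(idx)
--
--     return answer
-- ===== SOURCE B (Python) =====
-- def solution(answers):
--     pats = ([1, 2, 3, 4, 5],
--             [2, 1, 2, 3, 2, 4, 2, 5],
--             [3, 3, 1, 1, 2, 2, 4, 4, 5, 5])
--     # one pass: histogram of answers bucketed by (index mod 40, value);
--     # 40 = lcm(5, 8, 10), so each pattern is constant on a residue class mod 40
--     keys = [(i % 40, a) for i, a in enumerate(answers)]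
--     freq = {}
--     for k in keys:
--         freq[k] = freq.get(k, 0) + 1
--     scores = [sum(freq.get((r, pat[r % len(pat)]), 0) for r in range(40))
--               for pat in pats]
--     best = max(scores)
--     return [i + 1 for i, s in enumerate(scores) if s == best]
-- ===== Notes on version B (the rewrite author's own statement) =====
-- stated objective: alternative
-- what changed: B buckets the answers in one pass into a frequency table keyed by (index mod 40, value) (40 = lcm of the three pattern periods) and computes each student's score as a fixed 40-term sum of bucket counts, instead of A's per-answer comparison against all three cyclic patterns; the [-1,s1,s2,s3] sentinel selection becomes i+1 enumeration over the score list.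
import Mathlib
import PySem

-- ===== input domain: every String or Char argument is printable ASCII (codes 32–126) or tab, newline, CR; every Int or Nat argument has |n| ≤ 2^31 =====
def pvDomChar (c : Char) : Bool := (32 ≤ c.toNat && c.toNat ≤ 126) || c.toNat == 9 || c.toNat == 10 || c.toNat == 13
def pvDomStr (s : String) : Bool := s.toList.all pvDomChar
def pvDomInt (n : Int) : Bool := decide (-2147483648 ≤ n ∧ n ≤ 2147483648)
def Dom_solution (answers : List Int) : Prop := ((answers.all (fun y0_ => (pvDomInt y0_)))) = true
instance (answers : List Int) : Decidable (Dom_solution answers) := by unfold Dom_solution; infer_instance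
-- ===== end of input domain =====

-- B replaces A's per-answer comparison against all three cyclic patterns with a one-pass
-- histogram keyed by (index mod 40, value) (40 = lcm of the pattern periods) plus a fixed
-- 40-term sum per student; objective: alternative algorithm, same O(n) cost.

-- ===== PORT A =====
-- Indices idx % 5 / % 8 / % 10 are always in range of the fixed non-empty pattern
-- lists, so the `.getD 0` on pyGet? never supplies its default.
def solution (answers : List Int) : List Int :=
  let std1 : List Int := [1, 2, 3, 4, 5]
  let std2 : List Int := [2, 1, 2, 3, 2, 4, 2, 5]
  let std3 : List Int := [3, 3, 1, 1, 2, 2, 4, 4, 5, 5]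
  let s := (PySem.List.enumerate answers 0).foldl
    (fun (s : Int × Int × Int) p =>
      let s1 := if p.2 = (PySem.List.pyGet? std1 (PySem.Int.mod p.1 5)).getD 0 then s.1 + 1 else s.1
      let s2 := if p.2 = (PySem.List.pyGet? std2 (PySem.Int.mod p.1 8)).getD 0 then s.2.1 + 1 else s.2.1
      let s3 := if p.2 = (PySem.List.pyGet? std3 (PySem.Int.mod p.1 10)).getD 0 then s.2.2 + 1 else s.2.2
      (s1, s2, s3)) (0, 0, 0)
  let maxScore := max s.1 (max s.2.1 s.2.2)
  let arr : List Int := [-1, s.1, s.2.1, s.2.2]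
  (PySem.List.enumerate arr 0).foldl (fun acc p => if p.2 = maxScore then acc ++ [p.1] else acc) []

-- ===== PORT B =====
-- histogram of (index mod 40, value) built by the dict loop, then per-pattern 40-term sums;
-- r % len(pat) is always in range of the fixed non-empty patterns, so `.getD 0` never fires.
def solution_alt (answers : List Int) : List Int :=
  let pats : List (List Int) :=
    [[1, 2, 3, 4, 5], [2, 1, 2, 3, 2, 4, 2, 5], [3, 3, 1, 1, 2, 2, 4, 4, 5, 5]]
  let keys : List (Int × Int) :=
    (PySem.List.enumerate answers 0).map (fun p => (PySem.Int.mod p.1 40, p.2))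
  let freq : PySem.Dict (Int × Int) Int :=
    keys.foldl (fun d k => d.insert k (d.getD k 0 + 1)) PySem.Dict.empty
  let scores : List Int := pats.map (fun pat =>
    ((PySem.List.pyRange 0 40 1).map (fun r =>
      freq.getD (r, (PySem.List.pyGet? pat (PySem.Int.mod r (pat.length : Int))).getD 0) 0)).sum)
  let best := (PySem.List.max? scores (fun y => y)).getD 0   -- scores is non-empty, getD default unused
  (PySem.List.enumerate scores 0).filterMap
    (fun p => if p.2 = best then some (p.1 + 1) else none)

-- ===== PRECONDITION & SPEC =====
def Spec_solution (answers : List Int) (out : List Int) : Prop := out = solution_alt answers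
instance (answers : List Int) (out : List Int) : Decidable (Spec_solution answers out) := by unfold Spec_solution; infer_instance

-- ===== CLAIM =====
def Claim_equal_solution : Prop := ∀ (answers : List Int), Dom_solution answers → Spec_solution answers (solution answers)

-- ===== LEMMAS AND PROOFS =====

-- per-pattern count of A's loop, with the running index made explicit
def cnt (pat : List Int) : List Int → Nat → Int
  | [], _ => 0
  | a :: as, i => (if a = (pat[i % pat.length]?).getD 0 then 1 else 0) + cnt pat as (i + 1)

theorem cnt_nonneg (pat : List Int) : ∀ rest i, 0 ≤ cnt pat rest i := by
  intro rest
  induction rest with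
  | nil => intro i; simp [cnt]
  | cons a as ih => intro i; have := ih (i + 1); simp only [cnt]; split <;> omega

-- indicator sums over a nodup list of residues
theorem sum_ind_zero (g : Int → Int) (a r0 : Int) :
    ∀ (l : List Int), r0 ∉ l →
      (l.map (fun r => if (r0, a) = (r, g r) then (1 : Int) else 0)).sum = 0 := by
  intro l
  induction l with
  | nil => intro _; simp
  | cons b bs ih =>
    intro h
    have hb : r0 ≠ b := fun he => h (he ▸ List.mem_cons_self)
    have hbs : r0 ∉ bs := fun hm => h (List.mem_cons_of_mem _ hm)
    rw [List.map_cons, List.sum_cons, ih hbs, if_neg (by simp [hb]), add_zero]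

theorem sum_ind (g : Int → Int) (a r0 : Int) :
    ∀ (l : List Int), l.Nodup → r0 ∈ l →
      (l.map (fun r => if (r0, a) = (r, g r) then (1 : Int) else 0)).sum
        = if a = g r0 then 1 else 0 := by
  intro l
  induction l with
  | nil => intro _ h; cases h
  | cons b bs ih =>
    intro hnd hm
    rcases List.mem_cons.mp hm with he | hm'
    · subst he
      have hni : r0 ∉ bs := (List.nodup_cons.mp hnd).1
      rw [List.map_cons, List.sum_cons, sum_ind_zero g a r0 bs hni, add_zero]
      by_cases ha : a = g r0 <;> simp [ha]
    · have hb : r0 ≠ b := by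
        intro he; exact (List.nodup_cons.mp hnd).1 (he ▸ hm')
      rw [List.map_cons, List.sum_cons, ih (List.nodup_cons.mp hnd).2 hm',
        if_neg (by simp [hb]), zero_add]

-- the histogram sum over the 40 residue classes equals A's per-pattern count
theorem sum_count_eq_cnt (pat : List Int) (hd : pat.length ∣ 40) :
    ∀ (answers : List Int) (n : Nat),
      ((PySem.List.pyRange 0 40 1).map (fun r =>
        (((PySem.List.enumerate answers (n : Int)).map
            (fun p => (PySem.Int.mod p.1 40, p.2))).count
          (r, (PySem.List.pyGet? pat (PySem.Int.mod r (pat.length : Int))).getD 0) : Int))).sum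
      = cnt pat answers n := by
  intro answers
  induction answers with
  | nil => intro n; simp [cnt, PySem.List.enumerate_nil]
  | cons a as ih =>
    intro n
    have hcast : ((n : Int) + 1) = ((n + 1 : Nat) : Int) := by push_cast; ring
    have hm40 : PySem.Int.mod ((n : Nat) : Int) 40 = ((n % 40 : Nat) : Int) := by
      exact_mod_cast PySem.Int.mod_natCast n 40
    rw [PySem.List.enumerate_cons, hcast]
    simp only [List.map_cons, List.count_cons, hm40]
    push_cast
    rw [PySem.List.sum_map_add_int]
    have ih' := ih (n + 1)
    push_cast at ih'
    rw [ih']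
    have hind := sum_ind
      (fun r => (PySem.List.pyGet? pat (PySem.Int.mod r (pat.length : Int))).getD 0)
      a ((n % 40 : Nat) : Int) (PySem.List.pyRange 0 40 1)
      (PySem.List.nodup_pyRange_one 0 40)
      (by rw [PySem.List.mem_pyRange_one]; omega)
    push_cast at hind
    simp only [beq_iff_eq]
    have hS : (List.map (fun r => if ((n : Int) % 40, a) = (r, (PySem.List.pyGet? pat (PySem.Int.mod r (pat.length : Int))).getD 0) then (1 : Int) else 0) (PySem.List.pyRange 0 40 1)).sum = if a = (PySem.List.pyGet? pat (PySem.Int.mod ((n : Int) % 40) (pat.length : Int))).getD 0 then (1 : Int) else 0 := hind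
    rw [hS]
    have hmodL : PySem.Int.mod ((n : Int) % 40) (pat.length : Int)
        = ((n % pat.length : Nat) : Int) := by
      have h1 : ((n : Int) % 40) = ((n % 40 : Nat) : Int) := by push_cast; ring
      have h2 : PySem.Int.mod (((n % 40 : Nat) : Nat) : Int) ((pat.length : Nat) : Int)
          = ((n % 40 % pat.length : Nat) : Int) := by
        exact_mod_cast PySem.Int.mod_natCast (n % 40) pat.length
      rw [h1, h2, Nat.mod_mod_of_dvd n hd]
    simp only [cnt, hmodL, PySem.List.pyGet?_natCast]
    by_cases hcond : a = (pat[n % pat.length]?).getD 0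
    · simp [hcond]
      omega
    · simp [hcond]

-- A's fused loop computes the three independent counts
theorem loopA_eq (answers : List Int) :
    ∀ (n : Nat) (s1 s2 s3 : Int),
      (PySem.List.enumerate answers (n : Int)).foldl
        (fun (s : Int × Int × Int) p =>
          (if p.2 = (PySem.List.pyGet? ([1,2,3,4,5] : List Int) (PySem.Int.mod p.1 5)).getD 0 then s.1 + 1 else s.1,
           if p.2 = (PySem.List.pyGet? ([2,1,2,3,2,4,2,5] : List Int) (PySem.Int.mod p.1 8)).getD 0 then s.2.1 + 1 else s.2.1,
           if p.2 = (PySem.List.pyGet? ([3,3,1,1,2,2,4,4,5,5] : List Int) (PySem.Int.mod p.1 10)).getD 0 then s.2.2 + 1 else s.2.2)) (s1, s2, s3)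
      = (s1 + cnt [1,2,3,4,5] answers n,
         s2 + cnt [2,1,2,3,2,4,2,5] answers n,
         s3 + cnt [3,3,1,1,2,2,4,4,5,5] answers n) := by
  induction answers with
  | nil => intro n s1 s2 s3; simp [cnt, PySem.List.enumerate_nil]
  | cons a as ih =>
    intro n s1 s2 s3
    have hm5 : PySem.Int.mod ((n : Nat) : Int) 5 = ((n % 5 : Nat) : Int) := by
      exact_mod_cast PySem.Int.mod_natCast n 5
    have hm8 : PySem.Int.mod ((n : Nat) : Int) 8 = ((n % 8 : Nat) : Int) := by
      exact_mod_cast PySem.Int.mod_natCast n 8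
    have hm10 : PySem.Int.mod ((n : Nat) : Int) 10 = ((n % 10 : Nat) : Int) := by
      exact_mod_cast PySem.Int.mod_natCast n 10
    rw [PySem.List.enumerate_cons, List.foldl_cons]
    have hcast : ((n : Int) + 1) = ((n + 1 : Nat) : Int) := by push_cast; ring
    simp only [hm5, hm8, hm10, PySem.List.pyGet?_natCast, hcast, ih, cnt,
      show (([1,2,3,4,5] : List Int)).length = 5 from rfl,
      show (([2,1,2,3,2,4,2,5] : List Int)).length = 8 from rfl,
      show (([3,3,1,1,2,2,4,4,5,5] : List Int)).length = 10 from rfl,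
      Prod.mk.injEq]
    refine ⟨?_, ?_, ?_⟩ <;> split <;> omega

-- the selection step: A over [-1, s1, s2, s3] equals B over [s1, s2, s3], given non-negative scores
theorem select_eq (s1 s2 s3 : Int) (h1 : 0 ≤ s1) :
    (PySem.List.enumerate ([-1, s1, s2, s3] : List Int) 0).foldl
      (fun acc p => if p.2 = max s1 (max s2 s3) then acc ++ [p.1] else acc) []
    = (PySem.List.enumerate ([s1, s2, s3] : List Int) 0).filterMap
      (fun p => if p.2 = (PySem.List.max? ([s1, s2, s3] : List Int) (fun y => y)).getD 0
                then some (p.1 + 1) else none) := by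
  have hmax : (PySem.List.max? ([s1, s2, s3] : List Int) (fun y => y)).getD 0
      = max s1 (max s2 s3) := by
    rw [PySem.List.max?_id_cons]
    simp [max_assoc]
  rw [hmax]
  have hMne : ¬((-1 : Int) = max s1 (max s2 s3)) := by
    have : s1 ≤ max s1 (max s2 s3) := le_max_left _ _
    omega
  simp only [PySem.List.enumerate_cons, PySem.List.enumerate_nil, List.foldl_cons,
    List.foldl_nil, List.filterMap_cons, List.filterMap_nil, hMne]
  norm_num
  split_ifs <;> simp

-- ===== VERDICT =====
theorem solution_spec : Claim_equal_solution := by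
  intro answers _
  unfold Spec_solution
  simp only [solution, solution_alt, List.map]
  have hA := loopA_eq answers 0 0 0 0
  simp only [Nat.cast_zero, zero_add] at hA
  rw [hA]
  dsimp only
  rw [PySem.Dict.foldl_insert_getD_add_one_eq_counter]
  simp only [PySem.Dict.getD_counter]
  have h1 := sum_count_eq_cnt [1,2,3,4,5] (by norm_num) answers 0
  have h2 := sum_count_eq_cnt [2,1,2,3,2,4,2,5] (by norm_num) answers 0
  have h3 := sum_count_eq_cnt [3,3,1,1,2,2,4,4,5,5] (by norm_num) answers 0
  simp only [Nat.cast_zero] at h1 h2 h3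
  rw [h1, h2, h3]
  exact select_eq _ _ _ (cnt_nonneg _ _ _)
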